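-- pv_equiv track=rewrite | github.com/Wizard-32/Toric-Varieties | veccheck.py | vecToMatrix
-- ===== SOURCE A (Python) =====
-- def vecToMatrix(vec):
--     n = len(vec)
--     arr = [[0 for i in range(n)] for j in range(n)]
--     for k in range(n):
--         arr[k][(k-1) % n] = 1
--         arr[k][k] = -vec[k]
--         arr[k][(k+1) % n] = 1
--     return arr
-- ===== SOURCE B (Python) =====
-- def vecToMatrix(vec):
--     n = len(vec)
--
--     def value(k, j):
--         if j == (k + 1) % n:
--             return 1
--         if j == k:
--             return -vec[k]
--         if j == (k - 1) % n:
--             return 1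
--         return 0
--
--     return [[value(k, j) for j in range(n)] for k in range(n)]
-- ===== Notes on version B (the rewrite author's own statement) =====
-- stated objective: alternative
-- what changed: Replaces zero-fill-then-patch (build an n x n zero matrix, then overwrite three cells per row in place) by a uniform per-cell construction: each row is produced directly as [value(k,j) for j in range(n)], with value encoding the super-diagonal > diagonal > sub-diagonal last-write-wins precedence.
import Mathlib
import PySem

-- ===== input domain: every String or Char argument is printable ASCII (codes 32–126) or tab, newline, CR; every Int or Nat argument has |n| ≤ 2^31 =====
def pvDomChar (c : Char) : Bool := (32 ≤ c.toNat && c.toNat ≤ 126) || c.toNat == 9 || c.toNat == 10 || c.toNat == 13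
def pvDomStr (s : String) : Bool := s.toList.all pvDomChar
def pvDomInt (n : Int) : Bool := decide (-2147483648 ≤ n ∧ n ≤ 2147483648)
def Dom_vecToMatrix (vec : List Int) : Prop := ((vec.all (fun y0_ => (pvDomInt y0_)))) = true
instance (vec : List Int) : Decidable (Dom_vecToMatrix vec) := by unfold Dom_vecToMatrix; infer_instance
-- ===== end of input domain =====

-- B builds each row cell by cell with an explicit precedence formula instead of
-- zero-filling the matrix and patching three cells per row (objective: alternative).


-- ===== PORT A =====
-- loop body of A: arr[k][(k-1)%n] = 1; arr[k][k] = -vec[k]; arr[k][(k+1)%n] = 1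
def pvStepA (vec : List Int) (n : Int) (arr : List (List Int)) (k : Int) : List (List Int) :=
  let arr := PySem.List.pySetD arr k
    (PySem.List.pySetD (PySem.List.pyGetD arr k []) (PySem.Int.mod (k - 1) n) 1)
  let arr := PySem.List.pySetD arr k
    (PySem.List.pySetD (PySem.List.pyGetD arr k []) k (-(PySem.List.pyGetD vec k 0)))
  PySem.List.pySetD arr k
    (PySem.List.pySetD (PySem.List.pyGetD arr k []) (PySem.Int.mod (k + 1) n) 1)

def vecToMatrix (vec : List Int) : List (List Int) :=
  (PySem.List.pyRange 0 (PySem.List.len vec) 1).foldl (pvStepA vec (PySem.List.len vec))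
    ((PySem.List.pyRange 0 (PySem.List.len vec) 1).map
      (fun _ => (PySem.List.pyRange 0 (PySem.List.len vec) 1).map (fun _ => (0 : Int))))

-- ===== PORT B =====
-- B's helper 'value(k, j)': super-diagonal, then diagonal, then sub-diagonal, else 0
def pvValue (vec : List Int) (n k j : Int) : Int :=
  if j = PySem.Int.mod (k + 1) n then 1
  else if j = k then -(PySem.List.pyGetD vec k 0)
  else if j = PySem.Int.mod (k - 1) n then 1
  else 0

def vecToMatrix_alt (vec : List Int) : List (List Int) :=
  (PySem.List.pyRange 0 (PySem.List.len vec) 1).map (fun k =>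
    (PySem.List.pyRange 0 (PySem.List.len vec) 1).map
      (fun j => pvValue vec (PySem.List.len vec) k j))

-- ===== PRECONDITION & SPEC =====
def Spec_vecToMatrix (vec : List Int) (out : List (List Int)) : Prop := out = vecToMatrix_alt vec
instance (vec : List Int) (out : List (List Int)) : Decidable (Spec_vecToMatrix vec out) := by unfold Spec_vecToMatrix; infer_instance

-- ===== CLAIM (what is proved, stated in full; the proofs are below) =====
def Claim_equal_vecToMatrix : Prop := ∀ (vec : List Int), Dom_vecToMatrix vec → Spec_vecToMatrix vec (vecToMatrix vec)

-- ===== LEMMAS AND PROOFS =====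

theorem pvStepA_length (vec : List Int) (n : Int) (arr : List (List Int)) (k : Int) :
    (pvStepA vec n arr k).length = arr.length := by
  simp [pvStepA, PySem.List.length_pySetD]

theorem pvFold_length (vec : List Int) (n : Int) (L : List Int) (arr : List (List Int)) :
    (L.foldl (pvStepA vec n) arr).length = arr.length := by
  induction L generalizing arr with
  | nil => rfl
  | cons x xs ih => simp [List.foldl_cons, ih, pvStepA_length]

theorem pvStepA_untouched (vec : List Int) (n : Int) (arr : List (List Int)) (k : Int)
    (i : Nat) (hk : 0 ≤ k) (hne : k ≠ (i : Int)) :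
    (pvStepA vec n arr k)[i]? = arr[i]? := by
  have h : k.toNat ≠ i := by omega
  simp [pvStepA, PySem.List.pySetD_of_nonneg _ _ hk, List.getElem?_set_ne h]

theorem pvFold_untouched (vec : List Int) (n : Int) (L : List Int) (arr : List (List Int))
    (i : Nat) (h : ∀ x ∈ L, 0 ≤ x ∧ x ≠ (i : Int)) :
    (L.foldl (pvStepA vec n) arr)[i]? = arr[i]? := by
  induction L generalizing arr with
  | nil => rfl
  | cons x xs ih =>
    have hx := h x (by simp)
    rw [List.foldl_cons, ih _ (fun y hy => h y (by simp [hy])),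
      pvStepA_untouched vec n arr x i hx.1 hx.2]

theorem pvStepA_touched (vec : List Int) (n : Int) (arr : List (List Int)) (i : Nat)
    (hi : i < arr.length) :
    (pvStepA vec n arr (i : Int))[i]? =
      some (PySem.List.pySetD
              (PySem.List.pySetD
                (PySem.List.pySetD (arr.getD i []) (PySem.Int.mod ((i : Int) - 1) n) 1)
                (i : Int) (-(PySem.List.pyGetD vec (i : Int) 0)))
              (PySem.Int.mod ((i : Int) + 1) n) 1) := by
  simp [pvStepA, hi, List.getD_eq_getElem?_getD]

-- the patched zero row read at column j equals B's per-cell formula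
theorem pvRow_eq (vec : List Int) (n i j : Nat)
    (hi : i < n) (hj : j < n) :
    (PySem.List.pySetD
        (PySem.List.pySetD
          (PySem.List.pySetD ((PySem.List.pyRange 0 (n : Int) 1).map (fun _ => (0 : Int)))
            (PySem.Int.mod ((i : Int) - 1) (n : Int)) 1)
          (i : Int) (-(PySem.List.pyGetD vec (i : Int) 0)))
        (PySem.Int.mod ((i : Int) + 1) (n : Int)) 1)[j]? =
      some (pvValue vec (n : Int) (i : Int) (j : Int)) := by
  have hn0 : (0 : Int) < (n : Int) := by omega
  have hc0 : 0 ≤ PySem.Int.mod ((i : Int) - 1) (n : Int) := PySem.Int.mod_nonneg _ hn0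
  have hcn : PySem.Int.mod ((i : Int) - 1) (n : Int) < n := PySem.Int.mod_lt _ hn0
  have ha0 : 0 ≤ PySem.Int.mod ((i : Int) + 1) (n : Int) := PySem.Int.mod_nonneg _ hn0
  have han : PySem.Int.mod ((i : Int) + 1) (n : Int) < n := PySem.Int.mod_lt _ hn0
  have hlen : ((PySem.List.pyRange 0 (n : Int) 1).map (fun _ => (0 : Int))).length = n := by
    simp [PySem.List.length_pyRange_one]
  rw [PySem.List.pySetD_of_nonneg _ _ hc0,
    PySem.List.pySetD_of_nonneg _ _ (by omega : (0:Int) ≤ (i : Int)),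
    PySem.List.pySetD_of_nonneg _ _ ha0]
  unfold pvValue
  by_cases h1 : (j : Int) = PySem.Int.mod ((i : Int) + 1) (n : Int)
  · have ht : (PySem.Int.mod ((i : Int) + 1) (n : Int)).toNat = j := by omega
    rw [ht, List.getElem?_set_self (by simp [hj])]
    simp [h1]
  · have hne1 : (PySem.Int.mod ((i : Int) + 1) (n : Int)).toNat ≠ j := by omega
    rw [List.getElem?_set_ne hne1]
    by_cases h2 : (j : Int) = (i : Int)
    · have ht : (i : Int).toNat = j := by omega
      rw [h2] at h1
      have hji : j = i := by omega
      subst hji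
      rw [ht, List.getElem?_set_self (by simp [hj])]
      simp [h1]
    · have hne2 : (i : Int).toNat ≠ j := by omega
      rw [List.getElem?_set_ne hne2]
      by_cases h3 : (j : Int) = PySem.Int.mod ((i : Int) - 1) (n : Int)
      · have ht : (PySem.Int.mod ((i : Int) - 1) (n : Int)).toNat = j := by omega
        rw [h3] at h1 h2
        rw [ht, List.getElem?_set_self (by simp [hj])]
        simp [h1, h2, h3]
      · have hne3 : (PySem.Int.mod ((i : Int) - 1) (n : Int)).toNat ≠ j := by omega
        rw [List.getElem?_set_ne hne3,
          PySem.List.getElem?_map_pyRange_zero _ _ _ hj]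
        simp [h1, h2, h3]

-- ===== VERDICT (by name: the statement is the Claim_ definition above) =====
theorem vecToMatrix_spec : Claim_equal_vecToMatrix := by
  intro vec _
  unfold Spec_vecToMatrix vecToMatrix vecToMatrix_alt
  rw [PySem.List.len_eq]
  set n : Nat := vec.length with hn
  apply List.ext_getElem?
  intro i
  by_cases hi : i < n
  · -- split the loop range at its i-th element
    have hcons : PySem.List.pyRange (i : Int) (n : Int) 1 =
        (i : Int) :: PySem.List.pyRange ((i : Int) + 1) (n : Int) 1 :=
      PySem.List.pyRange_one_cons (by omega)
    have hsplit : PySem.List.pyRange 0 (n : Int) 1 =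
        PySem.List.pyRange 0 (i : Int) 1 ++ (i : Int) ::
          PySem.List.pyRange ((i : Int) + 1) (n : Int) 1 := by
      rw [PySem.List.pyRange_one_append 0 (i : Int) (n : Int) (by omega) (by omega), hcons]
    rw [show ((PySem.List.pyRange 0 (n : Int) 1).foldl (pvStepA vec (n : Int))
          ((PySem.List.pyRange 0 (n : Int) 1).map
            (fun _ => (PySem.List.pyRange 0 (n : Int) 1).map (fun _ => (0 : Int))))) =
        ((PySem.List.pyRange 0 (i : Int) 1 ++ (i : Int) ::
            PySem.List.pyRange ((i : Int) + 1) (n : Int) 1).foldl (pvStepA vec (n : Int))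
          ((PySem.List.pyRange 0 (n : Int) 1).map
            (fun _ => (PySem.List.pyRange 0 (n : Int) 1).map (fun _ => (0 : Int)))))
        from by rw [← hsplit]]
    rw [List.foldl_append, List.foldl_cons]
    rw [pvFold_untouched vec (n : Int) _ _ i
      (fun x hx => by
        have := (PySem.List.mem_pyRange_one).1 hx
        constructor <;> omega)]
    have hunt : ((PySem.List.pyRange 0 (i : Int) 1).foldl (pvStepA vec (n : Int))
        ((PySem.List.pyRange 0 (n : Int) 1).map
          (fun _ => (PySem.List.pyRange 0 (n : Int) 1).map (fun _ => (0 : Int)))))[i]? =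
        some ((PySem.List.pyRange 0 (n : Int) 1).map (fun _ => (0 : Int))) := by
      rw [pvFold_untouched vec (n : Int) _ _ i
        (fun x hx => by
          have := (PySem.List.mem_pyRange_one).1 hx
          constructor <;> omega)]
      exact PySem.List.getElem?_map_pyRange_zero _ _ _ hi
    have hmidlen : ((PySem.List.pyRange 0 (i : Int) 1).foldl (pvStepA vec (n : Int))
        ((PySem.List.pyRange 0 (n : Int) 1).map
          (fun _ => (PySem.List.pyRange 0 (n : Int) 1).map (fun _ => (0 : Int))))).length = n := by
      rw [pvFold_length]; simp [PySem.List.length_pyRange_one]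
    rw [pvStepA_touched vec (n : Int) _ i (by omega)]
    have hgetD : ((PySem.List.pyRange 0 (i : Int) 1).foldl (pvStepA vec (n : Int))
        ((PySem.List.pyRange 0 (n : Int) 1).map
          (fun _ => (PySem.List.pyRange 0 (n : Int) 1).map (fun _ => (0 : Int))))).getD i [] =
        (PySem.List.pyRange 0 (n : Int) 1).map (fun _ => (0 : Int)) := by
      rw [List.getD_eq_getElem?_getD, hunt]; rfl
    rw [hgetD, PySem.List.getElem?_map_pyRange_zero _ _ _ hi]
    apply congrArg some
    apply List.ext_getElem?
    intro j
    by_cases hj : j < n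
    · rw [pvRow_eq vec n i j hi hj, PySem.List.getElem?_map_pyRange_zero _ _ _ hj]
    · rw [List.getElem?_eq_none, List.getElem?_eq_none]
      · simp [PySem.List.length_pyRange_one]; omega
      · simp [PySem.List.length_pySetD, PySem.List.length_pyRange_one]; omega
  · rw [List.getElem?_eq_none, List.getElem?_eq_none]
    · simp [PySem.List.length_pyRange_one]; omega
    · rw [pvFold_length]; simp [PySem.List.length_pyRange_one]; omega
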